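-- pv_equiv track=rewrite | github.com/lulz-lich/BlackCapy | scripts/validate_apps.py | split_top_level_entries
-- ===== SOURCE A (Python) =====
-- def split_top_level_entries(block: str) -> list[str]:
--     entries: list[str] = []
--     start = None
--     depth = 0
--     in_string = False
--     escaped = False
--
--     for index, char in enumerate(block):
--         if in_string:
--             if escaped:
--                 escaped = False
--             elif char == "\\":
--                 escaped = True
--             elif char == '"':
--                 in_string = False
--             continue
--
--         if char == '"':
--             in_string = True
--             continue
--
--         if char == "{":
--             if depth == 0:
--                 start = index + 1
--             depth += 1
--         elif char == "}":
--             depth -= 1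
--             if depth == 0 and start is not None:
--                 entries.append(block[start:index].strip())
--                 start = None
--
--     return entries
-- ===== SOURCE B (Python) =====
-- def _string_free_braces(block: str) -> list[tuple[int, str]]:
--     """Stage 1: positions of '{'/'}' lying outside double-quoted string literals."""
--     braces: list[tuple[int, str]] = []
--     n = len(block)
--     i = 0
--     while i < n:
--         c = block[i]
--         if c == '"':
--             # jump past the whole string literal
--             i += 1
--             while i < n:
--                 c = block[i]
--                 if c == "\\":
--                     i += 2
--                 elif c == '"':
--                     i += 1
--                     break
--                 else:
--                     i += 1
--         else:
--             if c == "{" or c == "}":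
--                 braces.append((i, c))
--             i += 1
--     return braces
--
--
-- def split_top_level_entries(block: str) -> list[str]:
--     # Stage 2: depth-match only the pre-extracted braces.
--     entries: list[str] = []
--     start = None
--     depth = 0
--     for i, c in _string_free_braces(block):
--         if c == "{":
--             if depth == 0:
--                 start = i + 1
--             depth += 1
--         else:
--             depth -= 1
--             if depth == 0 and start is not None:
--                 entries.append(block[start:i].strip())
--                 start = None
--     return entries
-- ===== Notes on version B (the rewrite author's own statement) =====
-- stated objective: alternative
-- what changed: Replaces A's single-pass per-character flag machine (in_string/escaped state) by a two-stage pipeline: a first scanner extracts the positions of braces lying outside string literals (skipping each literal with an inner index loop), then a separate depth-matching pass folds over that brace list only.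
import Mathlib
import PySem

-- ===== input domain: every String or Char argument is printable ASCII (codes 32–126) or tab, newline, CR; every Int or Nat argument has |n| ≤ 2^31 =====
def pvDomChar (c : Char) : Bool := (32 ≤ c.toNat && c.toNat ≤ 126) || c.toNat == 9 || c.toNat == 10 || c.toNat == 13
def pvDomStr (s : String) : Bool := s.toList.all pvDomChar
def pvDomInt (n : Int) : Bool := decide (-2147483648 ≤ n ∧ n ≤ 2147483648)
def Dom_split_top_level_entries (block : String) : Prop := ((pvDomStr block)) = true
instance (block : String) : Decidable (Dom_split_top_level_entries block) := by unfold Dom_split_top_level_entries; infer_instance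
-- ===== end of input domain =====

-- B replaces A's single-pass flag machine by a two-stage pipeline: stage 1 extracts the
-- positions of braces outside string literals (skipping each literal with an inner loop),
-- stage 2 depth-matches that brace list only; same return value (alternative decomposition).

-- ===== PORT A =====
-- one step per character, carrying (entries, start, depth, in_string, escaped), as A does
def goA (block : String) (cs : List Char) (i : Int) (entries : List String)
    (start : Option Int) (depth : Int) (inString : Bool) (escaped : Bool) : List String :=
  match cs with
  | [] => entries
  | c :: rest =>
    if inString then
      if escaped then goA block rest (i+1) entries start depth inString false
      else if c = '\\' then goA block rest (i+1) entries start depth inString true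
      else if c = '"' then goA block rest (i+1) entries start depth false escaped
      else goA block rest (i+1) entries start depth inString escaped
    else if c = '"' then goA block rest (i+1) entries start depth true escaped
    else if c = '{' then
      goA block rest (i+1) entries (if depth = 0 then some (i+1) else start) (depth+1) inString escaped
    else if c = '}' then
      if depth - 1 = 0 then
        match start with
        | some s =>
            goA block rest (i+1)
              (entries ++ [PySem.Str.strip (PySem.Str.slice block (some s) (some i))])
              none (depth-1) inString escaped
        | none => goA block rest (i+1) entries none (depth-1) inString escaped
      else goA block rest (i+1) entries start (depth-1) inString escaped
    else goA block rest (i+1) entries start depth inString escaped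

def split_top_level_entries (block : String) : List String :=
  goA block block.toList 0 [] none 0 false false

-- ===== PORT B =====
-- stage 1: _string_free_braces — outer scan collects braces, inner scan skips a string literal
mutual
def outerScan (cs : List Char) (i : Int) : List (Int × Char) :=
  match cs with
  | [] => []
  | c :: rest =>
    if c = '"' then innerScan rest (i+1)
    else if c = '{' ∨ c = '}' then (i, c) :: outerScan rest (i+1)
    else outerScan rest (i+1)
termination_by cs.length

def innerScan (cs : List Char) (i : Int) : List (Int × Char) :=
  match cs with
  | [] => []
  | c :: rest =>
    if c = '\\' then
      match rest with
      | [] => []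
      | _ :: rest' => innerScan rest' (i+2)
    else if c = '"' then outerScan rest (i+1)
    else innerScan rest (i+1)
termination_by cs.length
end

-- stage 2: one fold step of the depth-matching loop over the brace list
def stepB (block : String) (st : List String × Option Int × Int) (p : Int × Char) :
    List String × Option Int × Int :=
  if p.2 = '{' then
    (st.1, (if st.2.2 = 0 then some (p.1 + 1) else st.2.1), st.2.2 + 1)
  else
    if st.2.2 - 1 = 0 then
      match st.2.1 with
      | some s =>
          (st.1 ++ [PySem.Str.strip (PySem.Str.slice block (some s) (some p.1))], none, st.2.2 - 1)
      | none => (st.1, none, st.2.2 - 1)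
    else (st.1, st.2.1, st.2.2 - 1)

def split_top_level_entries_alt (block : String) : List String :=
  ((outerScan block.toList 0).foldl (stepB block) ([], none, 0)).1

-- ===== PRECONDITION & SPEC =====
def Spec_split_top_level_entries (block : String) (out : List String) : Prop := out = split_top_level_entries_alt block
instance (block : String) (out : List String) : Decidable (Spec_split_top_level_entries block out) := by unfold Spec_split_top_level_entries; infer_instance

-- ===== CLAIM (what is proved, stated in full; the proofs are below) =====
def Claim_equal_split_top_level_entries : Prop := ∀ (block : String), Dom_split_top_level_entries block → Spec_split_top_level_entries block (split_top_level_entries block)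

-- ===== LEMMAS AND PROOFS =====

-- A's machine outside a string equals the fold of stage 2 over stage 1's outer scan,
-- and inside a string (escaped=false) equals the fold over stage 1's inner scan.
lemma goA_eq_fold (block : String) : ∀ (n : Nat) (cs : List Char), cs.length ≤ n →
    ∀ (i : Int) (entries : List String) (start : Option Int) (depth : Int),
    goA block cs i entries start depth false false
      = ((outerScan cs i).foldl (stepB block) (entries, start, depth)).1 ∧
    goA block cs i entries start depth true false
      = ((innerScan cs i).foldl (stepB block) (entries, start, depth)).1 := by
  intro n
  induction n with
  | zero =>
    intro cs h i entries start depth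
    have hcs : cs = [] := by cases cs <;> simp_all
    subst hcs
    simp [goA, outerScan, innerScan]
  | succ n ih =>
    intro cs h i entries start depth
    cases cs with
    | nil => simp [goA, outerScan, innerScan]
    | cons c rest =>
      have hr : rest.length ≤ n := by simp at h; omega
      constructor
      · rw [goA.eq_def, outerScan.eq_def]
        dsimp only
        simp only [Bool.false_eq_true, if_false]
        by_cases h1 : c = '"'
        · simp only [if_pos h1]
          exact (ih _ hr _ _ _ _).2
        · simp only [if_neg h1]
          by_cases h2 : c = '{'
          · simp only [if_pos (Or.inl h2), List.foldl_cons, stepB, if_pos h2]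
            exact (ih _ hr _ _ _ _).1
          · simp only [if_neg h2]
            by_cases h3 : c = '}'
            · simp only [if_pos h3, if_pos (Or.inr h3), List.foldl_cons, stepB, if_neg h2]
              by_cases h4 : depth - 1 = 0
              · simp only [if_pos h4]
                cases start <;> exact (ih _ hr _ _ _ _).1
              · simp only [if_neg h4]
                exact (ih _ hr _ _ _ _).1
            · simp only [if_neg h3, if_neg (by tauto : ¬ (c = '{' ∨ c = '}'))]
              exact (ih _ hr _ _ _ _).1
      · rw [goA.eq_def, innerScan.eq_def]
        dsimp only
        simp only [if_true, Bool.false_eq_true, if_false]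
        by_cases h1 : c = '\\'
        · simp only [if_pos h1]
          cases rest with
          | nil => rw [goA.eq_def]; simp
          | cons d rest' =>
            rw [goA.eq_def]
            dsimp only
            simp only [if_true]
            have hr' : rest'.length ≤ n := by simp at h; omega
            have h2 : i + 1 + 1 = i + 2 := by ring
            rw [h2]
            exact (ih _ hr' _ _ _ _).2
        · simp only [if_neg h1]
          by_cases h2 : c = '"'
          · simp only [if_pos h2]
            exact (ih _ hr _ _ _ _).1
          · simp only [if_neg h2]
            exact (ih _ hr _ _ _ _).2

-- ===== VERDICT (by name: the statement is the Claim_ definition above) =====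
theorem split_top_level_entries_spec : Claim_equal_split_top_level_entries := by
  intro block _
  unfold Spec_split_top_level_entries split_top_level_entries split_top_level_entries_alt
  exact (goA_eq_fold block block.toList.length block.toList le_rfl 0 [] none 0).1
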